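-- pv_equiv track=rewrite | github.com/sgarner-lt/advent-of-code-2025 | solutions/bosque/day04/runner.py | create_visualization
-- ===== SOURCE A (Python) =====
-- def create_visualization(grid, accessible):
--     """
--     Create grid visualization.
--
--     Marks accessible rolls with 'x', keeps inaccessible rolls as '@',
--     and keeps empty spaces as '.'.
--
--     Args:
--         grid: 2D list of characters
--         accessible: List of (row, col) tuples for accessible positions
--
--     Returns:
--         String representation of the grid with newlines
--
--     Mirrors: function createVisualization(grid: List<List<Char>>, accessible: List<Position>): String
--     """
--     result = []
--
--     for row in range(len(grid)):
--         row_chars = []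
--         for col in range(len(grid[row])):
--             if (row, col) in accessible:
--                 row_chars.append('x')
--             else:
--                 row_chars.append(grid[row][col])
--         result.append(''.join(row_chars))
--
--     return '\n'.join(result)
-- ===== SOURCE B (Python) =====
-- def create_visualization(grid, accessible):
--     rows = [list(row) for row in grid]
--     for r, c in accessible:
--         if 0 <= r < len(rows) and 0 <= c < len(rows[r]):
--             rows[r][c] = 'x'
--     return '\n'.join(''.join(row) for row in rows)
-- ===== Notes on version B (the rewrite author's own statement) =====
-- stated objective: faster
-- what changed: B copies the grid once and scatters 'x' over the in-bounds accessible positions, instead of A's per-cell membership scan of the accessible list.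
import Mathlib
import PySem

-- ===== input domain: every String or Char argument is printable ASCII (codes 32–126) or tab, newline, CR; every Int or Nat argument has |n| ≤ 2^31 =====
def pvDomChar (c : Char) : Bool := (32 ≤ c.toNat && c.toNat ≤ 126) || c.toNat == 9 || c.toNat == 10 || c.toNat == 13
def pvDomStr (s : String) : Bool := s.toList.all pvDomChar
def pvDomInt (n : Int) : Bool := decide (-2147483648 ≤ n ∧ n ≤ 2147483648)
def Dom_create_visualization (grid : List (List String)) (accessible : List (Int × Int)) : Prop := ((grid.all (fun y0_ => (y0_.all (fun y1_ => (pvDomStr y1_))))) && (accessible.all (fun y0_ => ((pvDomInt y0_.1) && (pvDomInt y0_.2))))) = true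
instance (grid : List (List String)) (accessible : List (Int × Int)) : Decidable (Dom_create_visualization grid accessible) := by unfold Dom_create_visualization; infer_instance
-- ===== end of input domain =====

-- B builds a mutable copy of the grid and scatters 'x' over the in-bounds accessible positions
-- (one pass over the positions), instead of A's per-cell membership scan of the accessible list.
-- Equivalence of the return values is proved on the whole domain.

-- ===== PORT A =====
-- gather: for each cell, scan `accessible` for membership
def create_visualization (grid : List (List String)) (accessible : List (Int × Int)) : String :=
  PySem.Str.join "\n" ((List.range grid.length).map (fun (row : Nat) =>
    PySem.Str.join "" ((List.range (grid.getD row []).length).map (fun (col : Nat) =>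
      if ((row : Int), (col : Int)) ∈ accessible then "x" else (grid.getD row []).getD col ""))))

-- ===== PORT B =====
-- one in-bounds write of "x" (rows[r][c] = 'x' guarded by the bounds test)
def markStep (rows : List (List String)) (p : Int × Int) : List (List String) :=
  if 0 ≤ p.1 ∧ p.1 < (rows.length : Int) then
    if 0 ≤ p.2 ∧ p.2 < ((rows.getD p.1.toNat []).length : Int) then
      rows.set p.1.toNat ((rows.getD p.1.toNat []).set p.2.toNat "x")
    else rows
  else rows

-- scatter: copy the grid, write 'x' at each in-bounds accessible position, join
def create_visualization_alt (grid : List (List String)) (accessible : List (Int × Int)) : String :=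
  PySem.Str.join "\n" ((accessible.foldl markStep (grid.map (fun row => row))).map
    (fun row => PySem.Str.join "" row))

-- ===== PRECONDITION & SPEC =====
def Spec_create_visualization (grid : List (List String)) (accessible : List (Int × Int)) (out : String) : Prop := out = create_visualization_alt grid accessible
instance (grid : List (List String)) (accessible : List (Int × Int)) (out : String) : Decidable (Spec_create_visualization grid accessible out) := by unfold Spec_create_visualization; infer_instance

-- ===== CLAIM (what is proved, stated in full; the proofs are below) =====
def Claim_equal_create_visualization : Prop := ∀ (grid : List (List String)) (accessible : List (Int × Int)), Dom_create_visualization grid accessible → Spec_create_visualization grid accessible (create_visualization grid accessible)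

-- ===== LEMMAS AND PROOFS =====

theorem getD_set {α : Type} (l : List α) (t r : Nat) (v d : α) :
    (l.set t v).getD r d = if t = r ∧ r < l.length then v else l.getD r d := by
  simp only [List.getD_eq_getElem?_getD, List.getElem?_set]
  split_ifs with h1 h2 h3 <;> simp_all

theorem markStep_length (rows : List (List String)) (p : Int × Int) :
    (markStep rows p).length = rows.length := by
  unfold markStep; split_ifs <;> simp

theorem markStep_row_length (rows : List (List String)) (p : Int × Int) (r : Nat) :
    ((markStep rows p).getD r []).length = (rows.getD r []).length := by
  unfold markStep
  split_ifs with h1 h2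
  · rw [getD_set]
    split_ifs with h
    · rw [← h.1, List.length_set]
    · rfl
  · rfl
  · rfl

theorem markStep_cell (rows : List (List String)) (p : Int × Int) (r c : Nat)
    (hr : r < rows.length) (hc : c < (rows.getD r []).length) :
    ((markStep rows p).getD r []).getD c "" =
      if p = ((r : Int), (c : Int)) then "x" else (rows.getD r []).getD c "" := by
  unfold markStep
  by_cases hp : p = ((r : Int), (c : Int))
  · subst hp
    simp only [Int.toNat_natCast]
    rw [if_pos ⟨Int.natCast_nonneg r, by exact_mod_cast hr⟩,
        if_pos ⟨Int.natCast_nonneg c, by exact_mod_cast hc⟩,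
        getD_set, if_pos ⟨rfl, hr⟩, getD_set, if_pos ⟨rfl, hc⟩]
    simp
  · rw [if_neg hp]
    split_ifs with h1 h2
    · rw [getD_set]
      split_ifs with h
      · rw [h.1, getD_set, if_neg]
        intro hcon
        apply hp
        have e1 : p.1 = (r : Int) := by have := h.1; omega
        have e2 : p.2 = (c : Int) := by have := hcon.1; omega
        exact Prod.ext e1 e2
      · rfl
    · rfl
    · rfl

theorem mark_length (accessible : List (Int × Int)) (rows : List (List String)) :
    (accessible.foldl markStep rows).length = rows.length := by
  induction accessible generalizing rows with
  | nil => rfl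
  | cons p rest ih => simpa [List.foldl_cons, markStep_length] using ih (markStep rows p)

theorem mark_row_length (accessible : List (Int × Int)) (rows : List (List String)) (r : Nat) :
    ((accessible.foldl markStep rows).getD r []).length = (rows.getD r []).length := by
  induction accessible generalizing rows with
  | nil => rfl
  | cons p rest ih =>
    rw [List.foldl_cons, ih (markStep rows p), markStep_row_length]

theorem mark_cell (accessible : List (Int × Int)) (rows : List (List String)) (r c : Nat)
    (hr : r < rows.length) (hc : c < (rows.getD r []).length) :
    ((accessible.foldl markStep rows).getD r []).getD c "" =
      if ((r : Int), (c : Int)) ∈ accessible then "x" else (rows.getD r []).getD c "" := by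
  induction accessible generalizing rows with
  | nil => simp
  | cons p rest ih =>
    rw [List.foldl_cons]
    have hr' : r < (markStep rows p).length := by rw [markStep_length]; exact hr
    have hc' : c < ((markStep rows p).getD r []).length := by rw [markStep_row_length]; exact hc
    rw [ih (markStep rows p) hr' hc', markStep_cell rows p r c hr hc]
    by_cases hmem : ((r : Int), (c : Int)) ∈ rest
    · simp [hmem]
    · by_cases hpe : p = ((r : Int), (c : Int)) <;> simp [hmem, hpe, eq_comm]

theorem mark_row_eq (accessible : List (Int × Int)) (grid : List (List String)) (r : Nat)
    (hr : r < grid.length) :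
    (accessible.foldl markStep grid).getD r [] =
      (List.range (grid.getD r []).length).map (fun (col : Nat) =>
        if ((r : Int), (col : Int)) ∈ accessible then "x" else (grid.getD r []).getD col "") := by
  apply List.ext_getElem
  · simpa using mark_row_length accessible grid r
  · intro i h1 h2
    have hi : i < (grid.getD r []).length := by simpa using h2
    have := mark_cell accessible grid r i hr hi
    rw [List.getD_eq_getElem _ _ h1] at this
    simpa [List.getD_eq_getElem _ _ hi] using this

theorem mark_rows_eq (accessible : List (Int × Int)) (grid : List (List String)) :
    (accessible.foldl markStep grid).map (fun row => PySem.Str.join "" row) =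
      (List.range grid.length).map (fun (row : Nat) =>
        PySem.Str.join "" ((List.range (grid.getD row []).length).map (fun (col : Nat) =>
          if ((row : Int), (col : Int)) ∈ accessible then "x" else (grid.getD row []).getD col ""))) := by
  apply List.ext_getElem
  · simp [mark_length]
  · intro i h1 h2
    have hi : i < grid.length := by simpa [mark_length] using h1
    have hfi : i < (accessible.foldl markStep grid).length := by
      rw [mark_length]; exact hi
    simp only [List.getElem_map, List.getElem_range]
    rw [← List.getD_eq_getElem _ _ hfi, mark_row_eq accessible grid i hi]

-- ===== VERDICT (by name: the statement is the Claim_ definition above) =====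
theorem create_visualization_spec : Claim_equal_create_visualization := by
  intro grid accessible _
  show create_visualization grid accessible = create_visualization_alt grid accessible
  unfold create_visualization create_visualization_alt
  rw [List.map_id_fun', mark_rows_eq]
  simp only [id_eq]
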